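-- pv_equiv track=rewrite | github.com/liyi5895/wbw-finetune-dataset-prep | clean_content.py | clean_article_content
-- ===== SOURCE A (Python) =====
-- def clean_article_content(content):
--     # Define a pattern that matches any of the given strings
--     patterns = [
--         "If you like Wait But Why, sign up for",
--         "Related Wait But Why Posts",
--         "If you liked this, these are for you too",
--         "If you liked this post, check out",
--         "What to read next:",
--         "Tweet\n\t\t\t\t\t\t\t!function (d, s, id)"
--     ]
--
--     # Convert article to lower case for case-insensitive search
--     content_lower = content.lower()
--
--     # Initialize the end_index to the length of the article
--     end_index = len(content)
--
--     # Loop through each pattern and find the earliest occurrence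
--     for pattern in patterns:
--         pattern_index = content_lower.find(pattern.lower())
--         if pattern_index != -1:
--             # Update end_index to the earliest found pattern index
--             end_index = min(end_index, pattern_index)
--
--     # Slice the article up to the earliest pattern index
--     content = content[:end_index]
--
--     return content
-- ===== SOURCE B (Python) =====
-- _PATTERNS = [
--     "If you like Wait But Why, sign up for",
--     "Related Wait But Why Posts",
--     "If you liked this, these are for you too",
--     "If you liked this post, check out",
--     "What to read next:",
--     "Tweet\n\t\t\t\t\t\t\t!function (d, s, id)",
-- ]
-- _PATTERNS_LOWER = [p.lower() for p in _PATTERNS]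
--
-- def clean_article_content(content):
--     # Single left-to-right scan: cut at the first position where any marker starts.
--     low = content.lower()
--     for i in range(len(low)):
--         if any(low.startswith(p, i) for p in _PATTERNS_LOWER):
--             return content[:i]
--     return content
-- ===== Notes on version B (the rewrite author's own statement) =====
-- stated objective: alternative
-- what changed: Replaces six independent str.find passes plus a running minimum with one left-to-right scan that stops at the first position where any lowered marker starts (leftmost-match cut).
import Mathlib
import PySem

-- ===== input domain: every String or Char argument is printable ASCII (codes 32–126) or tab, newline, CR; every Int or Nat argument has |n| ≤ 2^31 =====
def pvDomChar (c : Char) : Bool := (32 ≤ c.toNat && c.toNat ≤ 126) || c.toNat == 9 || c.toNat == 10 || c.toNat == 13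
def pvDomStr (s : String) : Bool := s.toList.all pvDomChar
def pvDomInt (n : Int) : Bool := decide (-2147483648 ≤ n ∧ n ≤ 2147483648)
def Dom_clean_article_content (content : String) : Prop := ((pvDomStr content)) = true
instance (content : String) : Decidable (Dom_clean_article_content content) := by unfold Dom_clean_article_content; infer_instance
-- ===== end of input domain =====

-- B replaces the six-find-then-min passes by one left-to-right scan that cuts at the
-- first position where any marker starts (objective: alternative, same result).

-- ===== PORT A =====
def pvPatterns : List String :=
  [ "If you like Wait But Why, sign up for",
    "Related Wait But Why Posts",
    "If you liked this, these are for you too",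
    "If you liked this post, check out",
    "What to read next:",
    "Tweet\n\t\t\t\t\t\t\t!function (d, s, id)" ]

def clean_article_content (content : String) : String :=
  let patterns := pvPatterns
  let content_lower := PySem.Str.lower content
  let end_index : Int := PySem.Str.len content
  let end_index := patterns.foldl
    (fun e p =>
      let pattern_index := PySem.Str.find content_lower (PySem.Str.lower p)
      if pattern_index ≠ -1 then min e pattern_index else e)
    end_index
  PySem.Str.slice content none (some end_index)

-- ===== PORT B =====
def pvPatternsLower : List (List Char) :=
  pvPatterns.map (fun p => PySem.Chars.lower p.toList)

-- the scan of Source B: walk content and its lowered copy in step; at the first position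
-- where some lowered marker starts, return the characters passed so far (content[:i]).
def pvScan : List Char → List Char → List Char
  | o :: ot, l :: lt =>
      if pvPatternsLower.any (fun p => PySem.Chars.startswith (l :: lt) p) then []
      else o :: pvScan ot lt
  | orig, _ => orig

def clean_article_content_alt (content : String) : String :=
  String.ofList (pvScan content.toList (PySem.Chars.lower content.toList))

-- ===== PRECONDITION & SPEC =====
def Spec_clean_article_content (content : String) (out : String) : Prop := out = clean_article_content_alt content
instance (content : String) (out : String) : Decidable (Spec_clean_article_content content out) := by unfold Spec_clean_article_content; infer_instance

-- ===== CLAIM (what is proved, stated in full; the proofs are below) =====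
def Claim_equal_clean_article_content : Prop := ∀ (content : String), Dom_clean_article_content content → Spec_clean_article_content content (clean_article_content content)

-- ===== LEMMAS AND PROOFS =====

-- "some marker starts here": the predicate B tests at each suffix
def pvHit (l : List Char) : Bool :=
  pvPatternsLower.any (fun p => PySem.Chars.startswith l p)

-- index of the first position of `low` where some marker starts (= length if none)
def pvIdx : List Char → Nat
  | [] => 0
  | l :: lt => if pvHit (l :: lt) then 0 else pvIdx lt + 1

-- A's running minimum, named for the proofs
def pvFoldE (low : List Char) : Int :=
  pvPatternsLower.foldl
    (fun e q => if PySem.Chars.find low q ≠ -1 then min e (PySem.Chars.find low q) else e)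
    (low.length : Int)

theorem pvScan_eq_take (orig low : List Char) (h : orig.length = low.length) :
    pvScan orig low = orig.take (pvIdx low) := by
  induction low generalizing orig with
  | nil => cases orig with
    | nil => rfl
    | cons o ot => simp at h
  | cons l lt ih =>
    cases orig with
    | nil => simp at h
    | cons o ot =>
      simp only [pvScan, pvIdx, pvHit]
      split
      · simp
      · simp only [List.take_succ_cons, List.cons.injEq, true_and]
        exact ih ot (by simpa using h)

theorem pvIdx_not_hit (low : List Char) : ∀ j < pvIdx low, pvHit (low.drop j) = false := by
  induction low with
  | nil => intro j hj; simp [pvIdx] at hj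
  | cons l lt ih =>
    intro j hj
    simp only [pvIdx] at hj
    split at hj
    · omega
    · cases j with
      | zero => simp [‹¬ pvHit (l :: lt) = true›]
      | succ j' => exact ih j' (by omega)

theorem pvIdx_hit (low : List Char) (h : pvIdx low < low.length) :
    pvHit (low.drop (pvIdx low)) = true := by
  induction low with
  | nil => simp [pvIdx] at h
  | cons l lt ih =>
    by_cases hh : pvHit (l :: lt) = true
    · simp [pvIdx, hh]
    · have hidx : pvIdx (l :: lt) = pvIdx lt + 1 := by simp [pvIdx, hh]
      rw [hidx] at h ⊢
      simp only [List.drop_succ_cons]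
      exact ih (by simpa using h)

theorem pvIdx_eq_length (low : List Char) (h : ∀ j, pvHit (low.drop j) = false) :
    pvIdx low = low.length := by
  induction low with
  | nil => rfl
  | cons l lt ih =>
    have h0 := h 0
    simp only [List.drop_zero] at h0
    have ht := ih (fun j => by simpa using h (j + 1))
    simp [pvIdx, h0, ht]

-- uniqueness of the least hit position
theorem pvIdx_eq_of (low : List Char) (m : Nat)
    (hm : pvHit (low.drop m) = true) (hlt : ∀ j < m, pvHit (low.drop j) = false) :
    pvIdx low = m := by
  have hmlen : m < low.length := by
    by_contra hge
    rw [List.drop_eq_nil_of_le (by omega)] at hm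
    exact absurd hm (by decide)
  have h1 : pvIdx low ≤ m := by
    by_contra hgt
    have := pvIdx_not_hit low m (by omega)
    rw [this] at hm; exact absurd hm (by simp)
  have h2 : m ≤ pvIdx low := by
    by_contra hgt
    have hhit := pvIdx_hit low (by omega)
    have := hlt (pvIdx low) (by omega)
    rw [this] at hhit; exact absurd hhit (by simp)
  omega

-- A's fold: characterisation of the running minimum
theorem pvFold_spec (low : List Char) (qs : List (List Char)) (e0 : Int) :
    let e := qs.foldl
      (fun e q => if PySem.Chars.find low q ≠ -1 then min e (PySem.Chars.find low q) else e) e0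
    e ≤ e0 ∧
    (∀ q ∈ qs, PySem.Chars.find low q ≠ -1 → e ≤ PySem.Chars.find low q) ∧
    (e = e0 ∨ ∃ q ∈ qs, PySem.Chars.find low q ≠ -1 ∧ e = PySem.Chars.find low q) := by
  induction qs generalizing e0 with
  | nil => exact ⟨le_refl _, by simp, Or.inl rfl⟩
  | cons q qs ih =>
    simp only [List.foldl_cons]
    by_cases hq : PySem.Chars.find low q ≠ -1
    · rw [if_pos hq]
      obtain ⟨h1, h2, h3⟩ := ih (min e0 (PySem.Chars.find low q))
      refine ⟨le_trans h1 (min_le_left _ _), ?_, ?_⟩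
      · intro r hr hrne
        rcases List.mem_cons.1 hr with hr | hr
        · subst hr; exact le_trans h1 (min_le_right _ _)
        · exact h2 r hr hrne
      · rcases h3 with h3 | ⟨r, hr, hne, he⟩
        · rcases le_total e0 (PySem.Chars.find low q) with hle | hle
          · exact Or.inl (by rw [h3]; exact min_eq_left hle)
          · exact Or.inr ⟨q, by simp, hq, by rw [h3]; exact min_eq_right hle⟩
        · exact Or.inr ⟨r, by simp [hr], hne, he⟩
    · rw [if_neg hq]
      obtain ⟨h1, h2, h3⟩ := ih e0
      refine ⟨h1, ?_, ?_⟩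
      · intro r hr hrne
        rcases List.mem_cons.1 hr with hr | hr
        · subst hr; exact absurd hrne hq
        · exact h2 r hr hrne
      · rcases h3 with h3 | ⟨r, hr, hne, he⟩
        · exact Or.inl h3
        · exact Or.inr ⟨r, by simp [hr], hne, he⟩

theorem pvPatternsLower_ne_nil : ∀ q ∈ pvPatternsLower, q ≠ [] := by decide

-- a hit at position j means some pattern's find is ≥ 0 and ≤ j
theorem pvHit_find_le (low : List Char) (j : Nat) (h : pvHit (low.drop j) = true) :
    ∃ q ∈ pvPatternsLower, PySem.Chars.find low q ≠ -1 ∧ (PySem.Chars.find low q).toNat ≤ j := by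
  simp only [pvHit, List.any_eq_true] at h
  obtain ⟨q, hq, hst⟩ := h
  have hpre : q <+: low.drop j := (PySem.Chars.startswith_iff _ _).1 hst
  have hinf : q <:+: low := hpre.isInfix.trans (List.drop_suffix j low).isInfix
  have hnn : 0 ≤ PySem.Chars.find low q := (PySem.Chars.find_nonneg_iff low q).2 hinf
  obtain ⟨_, hleast⟩ := PySem.Chars.find_spec hnn
  refine ⟨q, hq, by omega, ?_⟩
  by_contra hgt
  exact hleast j (by omega) hpre

-- converse: find ≠ -1 gives a hit at find's position
theorem pvFind_hit (low : List Char) (q : List Char) (hq : q ∈ pvPatternsLower)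
    (h : PySem.Chars.find low q ≠ -1) :
    pvHit (low.drop (PySem.Chars.find low q).toNat) = true := by
  have hnn : 0 ≤ PySem.Chars.find low q := by
    have := PySem.Chars.neg_one_le_find low q; omega
  obtain ⟨hpre, _⟩ := PySem.Chars.find_spec hnn
  simp only [pvHit, List.any_eq_true]
  exact ⟨q, hq, (PySem.Chars.startswith_iff _ _).2 hpre⟩

-- the heart: A's end index is exactly B's first-hit index
theorem pvMain (low : List Char) :
    0 ≤ pvFoldE low ∧ (pvFoldE low).toNat = pvIdx low := by
  obtain ⟨h1, h2, h3⟩ := pvFold_spec low pvPatternsLower (low.length : Int)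
  rw [show (List.foldl
      (fun e q => if PySem.Chars.find low q ≠ -1 then min e (PySem.Chars.find low q) else e)
      (low.length : Int) pvPatternsLower) = pvFoldE low from rfl] at h1 h2 h3
  have hnn : 0 ≤ pvFoldE low := by
    rcases h3 with h3 | ⟨q, hq, hne, he⟩
    · rw [h3]; positivity
    · rw [he]; have := PySem.Chars.neg_one_le_find low q; omega
  refine ⟨hnn, ?_⟩
  rcases h3 with h3 | ⟨q, hq, hne, he⟩
  · -- the fold never shrank: no find succeeds at all
    have hallneg : ∀ q ∈ pvPatternsLower, PySem.Chars.find low q = -1 := by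
      intro q hq
      by_contra hne
      have hle := h2 q hq hne
      have hlen := PySem.Chars.find_le_length low q
      have hnnq : 0 ≤ PySem.Chars.find low q := by
        have := PySem.Chars.neg_one_le_find low q; omega
      have hlt : PySem.Chars.find low q < (low.length : Int) := by
        rcases lt_or_eq_of_le hlen with hc | hc
        · exact hc
        · exfalso
          obtain ⟨hpre, _⟩ := PySem.Chars.find_spec hnnq
          rw [hc] at hpre
          simp only [Int.toNat_natCast, List.drop_length] at hpre
          exact pvPatternsLower_ne_nil q hq (List.prefix_nil.1 hpre)
      rw [h3] at hle; omega
    have hnohit : ∀ j, pvHit (low.drop j) = false := by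
      intro j
      by_contra hh
      obtain ⟨q, hq, hne, _⟩ := pvHit_find_le low j (by simpa using hh)
      exact hne (hallneg q hq)
    rw [pvIdx_eq_length low hnohit, h3]
    simp
  · -- the fold is the smallest successful find: that is the first hit position
    have hhit : pvHit (low.drop (pvFoldE low).toNat) = true := by
      rw [he]; exact pvFind_hit low q hq hne
    have hlow : ∀ j < (pvFoldE low).toNat, pvHit (low.drop j) = false := by
      intro j hj
      by_contra hh
      obtain ⟨r, hr, hrne, hrle⟩ := pvHit_find_le low j (by simpa using hh)
      have := h2 r hr hrne
      have hnnr : 0 ≤ PySem.Chars.find low r := by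
        have := PySem.Chars.neg_one_le_find low r; omega
      omega
    exact (pvIdx_eq_of low (pvFoldE low).toNat hhit hlow).symm

-- length is preserved by Python's str.lower
theorem pvLower_length (cs : List Char) : (PySem.Chars.lower cs).length = cs.length := by
  simp [PySem.Chars.lower]

-- ===== VERDICT (by name: the statement is the Claim_ definition above) =====
theorem clean_article_content_spec : Claim_equal_clean_article_content := by
  intro content _
  unfold Spec_clean_article_content clean_article_content clean_article_content_alt
  apply String.toList_injective
  set cs := content.toList with hcs
  set low := PySem.Chars.lower cs with hlow
  have hlen : cs.length = low.length := (pvLower_length cs).symm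
  have hfold :
      pvPatterns.foldl
        (fun e p =>
          if PySem.Str.find (PySem.Str.lower content) (PySem.Str.lower p) ≠ -1 then
            min e (PySem.Str.find (PySem.Str.lower content) (PySem.Str.lower p)) else e)
        (PySem.Str.len content)
      = pvFoldE low := by
    rw [pvFoldE, pvPatternsLower, List.foldl_map]
    have hinit : PySem.Str.len content = (low.length : Int) := by
      rw [PySem.Str.len_eq, ← hcs, hlen]
    rw [hinit]
    have hfun : (fun (e : Int) (p : String) =>
          if PySem.Str.find (PySem.Str.lower content) (PySem.Str.lower p) ≠ -1 then
            min e (PySem.Str.find (PySem.Str.lower content) (PySem.Str.lower p)) else e)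
        = (fun (e : Int) (p : String) =>
          if PySem.Chars.find low (PySem.Chars.lower p.toList) ≠ -1 then
            min e (PySem.Chars.find low (PySem.Chars.lower p.toList)) else e) := by
      funext e p
      rw [PySem.Str.find_eq, PySem.Str.toList_lower, PySem.Str.toList_lower, ← hcs, ← hlow]
    rw [hfun]
  obtain ⟨hnn, htn⟩ := pvMain low
  simp only [hfold]
  rw [PySem.Str.slice, PySem.Chars.slice_eq_listSlice, PySem.List.slice_to _ hnn]
  rw [String.toList_ofList, String.toList_ofList]
  rw [pvScan_eq_take cs low (by omega), htn]
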